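-- pv_equiv track=rewrite | github.com/renero/pynewood | pynewood/utils.py | which_string
-- ===== SOURCE A (Python) =====
-- def letter_in_string(string, letter):
--     """Given a string, determine if that string contains the letter.
--     Parameters:
--       - string: a sequence of letters
--       - letter: a string character.
--
--     Return values:
--       - index position if found,
--       - -1 if ValueError exception is raised.
--     """
--     try:
--         return string.index(letter)
--     except ValueError:
--         return -1
--
-- def which_string(strings, letter, group_index=0):
--     """Return the string and position within that string where the letter
--     passed as argument is found.
--
--     Arguments:
--       - strings: an array of strings.
--       - letter: a single character to be found in strings
--
--     Return values:
--       - Tuple with index of string containing the letter, and position within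
--         the string. In case the letter is not found, both values are -1.
--     """
--     if len(strings) == 0:
--         return -1, -1
--     pos = letter_in_string(strings[0], letter)
--     if pos != -1:
--         return group_index, pos
--     else:
--         return which_string(strings[1:], letter, group_index + 1)
-- ===== SOURCE B (Python) =====
-- def which_string(strings, letter, group_index=0):
--     for i, s in enumerate(strings):
--         pos = s.find(letter)
--         if pos != -1:
--             return group_index + i, pos
--     return -1, -1
-- ===== Notes on version B (the rewrite author's own statement) =====
-- stated objective: faster
-- what changed: Replaces the recursion that rebuilds the tail with strings[1:] at every step (and the try/except .index helper) by a single enumerate loop using str.find.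
import Mathlib
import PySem

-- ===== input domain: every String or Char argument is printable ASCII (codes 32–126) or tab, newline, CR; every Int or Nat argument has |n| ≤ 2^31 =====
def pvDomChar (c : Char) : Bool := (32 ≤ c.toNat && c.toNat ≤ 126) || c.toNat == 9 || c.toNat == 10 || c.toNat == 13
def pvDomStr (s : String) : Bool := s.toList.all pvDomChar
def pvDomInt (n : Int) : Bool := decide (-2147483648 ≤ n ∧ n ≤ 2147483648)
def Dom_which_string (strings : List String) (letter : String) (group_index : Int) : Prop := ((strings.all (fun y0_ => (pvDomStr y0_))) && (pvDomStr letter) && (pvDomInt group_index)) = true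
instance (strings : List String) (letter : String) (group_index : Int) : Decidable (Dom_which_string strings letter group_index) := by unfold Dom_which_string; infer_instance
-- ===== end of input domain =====

-- B replaces A's recursion on strings[1:] (which copies the tail each step) by one enumerate loop; objective: faster.

-- ===== PORT A =====
-- string.index(letter) with ValueError mapped to -1 is exactly Python str.find
def letter_in_string (string : String) (letter : String) : Int :=
  PySem.Str.find string letter

def which_string (strings : List String) (letter : String) (group_index : Int) : List Int :=
  match strings with
  | [] => [-1, -1]
  | s :: rest =>
    let pos := letter_in_string s letter
    if pos ≠ -1 then [group_index, pos]
    else which_string rest letter (group_index + 1)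

-- ===== PORT B =====
-- the 'for i, s in enumerate(strings)' loop with early return
def whichLoopB (pairs : List (Int × String)) (letter : String) (group_index : Int) : List Int :=
  match pairs with
  | [] => [-1, -1]
  | (i, s) :: rest =>
    let pos := PySem.Str.find s letter
    if pos ≠ -1 then [group_index + i, pos]
    else whichLoopB rest letter group_index

def which_string_alt (strings : List String) (letter : String) (group_index : Int) : List Int :=
  whichLoopB (PySem.List.enumerate strings) letter group_index

-- ===== PRECONDITION & SPEC =====
def Spec_which_string (strings : List String) (letter : String) (group_index : Int) (out : List Int) : Prop := out = which_string_alt strings letter group_index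
instance (strings : List String) (letter : String) (group_index : Int) (out : List Int) : Decidable (Spec_which_string strings letter group_index out) := by unfold Spec_which_string; infer_instance

-- ===== CLAIM (what is proved, stated in full; the proofs are below) =====
def Claim_equal_which_string : Prop := ∀ (strings : List String) (letter : String) (group_index : Int), Dom_which_string strings letter group_index → Spec_which_string strings letter group_index (which_string strings letter group_index)

-- ===== LEMMAS AND PROOFS =====
theorem whichLoopB_enumerate (strings : List String) (letter : String) (g k : Int) :
    whichLoopB (PySem.List.enumerate strings k) letter g = which_string strings letter (g + k) := by
  induction strings generalizing k with
  | nil => simp [PySem.List.enumerate_nil, whichLoopB, which_string]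
  | cons s rest ih =>
    rw [PySem.List.enumerate_cons]
    simp only [whichLoopB, which_string, letter_in_string]
    split_ifs with h
    · rfl
    · rw [ih (k + 1)]; ring_nf

-- ===== VERDICT (by name: the statement is the Claim_ definition above) =====
theorem which_string_spec : Claim_equal_which_string := by
  intro strings letter g _
  unfold Spec_which_string which_string_alt
  have := whichLoopB_enumerate strings letter g 0
  simpa [PySem.List.enumerate] using this.symm
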